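-- pv_equiv track=rewrite | github.com/limdongsun0814/Algorithm | 프로그래머스/2/42890. 후보키/후보키.py | check
-- ===== SOURCE A (Python) =====
-- def check(relation,index):
--     arr = set()
--     for data in relation:
--         flag = []
--         for i in index:
--             flag.append(data[i])
--         flag = tuple(flag)
--         if flag not in arr:
--             arr.add(flag)
--         else:
--             return False
--     return True
-- ===== SOURCE B (Python) =====
-- def check(relation, index):
--     rows = [tuple(data[i] for i in index) for data in relation]
--
--     def distinct(rs):
--         if not rs:
--             return True
--         head, rest = rs[0], rs[1:]
--         return all(r != head for r in rest) and distinct(rest)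
--
--     return distinct(rows)
-- ===== Notes on version B (the rewrite author's own statement) =====
-- stated objective: alternative
-- what changed: Drops the hash set entirely: B projects all rows first, then checks distinctness by a recursive pairwise comparison (head against the rest of the list), trading A's single hash-set pass for set-free quadratic comparisons.
-- outside the precondition, e.g. on check([['a'], ['a'], []], [0]): A returns False, B raises IndexError
import Mathlib
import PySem

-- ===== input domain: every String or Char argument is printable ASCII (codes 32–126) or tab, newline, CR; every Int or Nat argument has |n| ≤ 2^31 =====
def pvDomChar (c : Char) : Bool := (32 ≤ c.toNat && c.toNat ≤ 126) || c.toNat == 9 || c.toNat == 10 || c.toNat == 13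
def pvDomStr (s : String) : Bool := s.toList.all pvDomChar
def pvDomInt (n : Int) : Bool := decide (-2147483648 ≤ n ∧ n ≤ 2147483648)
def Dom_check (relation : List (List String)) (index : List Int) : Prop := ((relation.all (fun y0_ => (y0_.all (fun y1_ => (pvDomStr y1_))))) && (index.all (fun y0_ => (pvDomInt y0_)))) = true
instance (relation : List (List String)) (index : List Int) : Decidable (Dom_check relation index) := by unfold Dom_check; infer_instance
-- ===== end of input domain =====

-- B drops the hash set: it projects all rows first, then checks distinctness by a
-- recursive pairwise comparison (head against the rest), where A keeps an incremental
-- set with an early return (objective: alternative).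

-- ===== PORT A =====
-- 'for i in index: flag.append(data[i])' as a foldl; data[i] via pyGetD (exact under Pre_check)
def checkGo (index : List Int) : List (List String) → PySem.Set (List String) → Bool
  | [], _ => true
  | data :: rest, arr =>
    let flag := index.foldl (fun acc i => acc ++ [PySem.List.pyGetD data i ""]) []
    if PySem.Set.contains arr flag then false
    else checkGo index rest (PySem.Set.add arr flag)

def check (relation : List (List String)) (index : List Int) : Bool :=
  checkGo index relation PySem.Set.empty

-- ===== PORT B =====
-- def distinct(rs): if not rs: True; head, rest = rs[0], rs[1:];
--   all(r != head for r in rest) and distinct(rest)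
def distinctRows : List (List String) → Bool
  | [] => true
  | head :: rest => rest.all (fun r => r != head) && distinctRows rest

-- rows = [tuple(data[i] for i in index) for data in relation]; distinct(rows)
def check_alt (relation : List (List String)) (index : List Int) : Bool :=
  distinctRows (relation.map (fun data => index.map (fun i => PySem.List.pyGetD data i "")))

-- ===== PRECONDITION & SPEC =====
-- Pre_ excludes any input with an index out of range for some row: there A raises IndexError
-- unless a duplicate among earlier rows makes it return False first, and B (which projects
-- every row before comparing) itself raises IndexError.
def Pre_check (relation : List (List String)) (index : List Int) : Prop :=
  ∀ data ∈ relation, ∀ i ∈ index, PySem.Raise.InRange data.length i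
instance (relation : List (List String)) (index : List Int) : Decidable (Pre_check relation index) := by unfold Pre_check; infer_instance
def pvWitness_check : List (List String) × List Int := ([["a", "b"], ["c", "b"]], [0, 1])
def Spec_check (relation : List (List String)) (index : List Int) (out : Bool) : Prop := out = check_alt relation index
instance (relation : List (List String)) (index : List Int) (out : Bool) : Decidable (Spec_check relation index out) := by unfold Spec_check; infer_instance

-- ===== CLAIM (what is proved, stated in full; the proofs are below) =====
def Claim_equal_check : Prop := ∀ (relation : List (List String)) (index : List Int), Dom_check relation index → Pre_check relation index → Spec_check relation index (check relation index)

-- ===== LEMMAS AND PROOFS =====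

-- A's inner append-loop builds the same projection as the map in B's comprehension
theorem proj_foldl_eq_map (index : List Int) (data : List String) (acc : List String) :
    index.foldl (fun acc i => acc ++ [PySem.List.pyGetD data i ""]) acc
      = acc ++ index.map (fun i => PySem.List.pyGetD data i "") := by
  induction index generalizing acc with
  | nil => simp
  | cons i rest ih => simp [List.foldl, ih]

-- characterisation of A's loop: true iff the projected rows are distinct and avoid the accumulator
theorem checkGo_iff (index : List Int) (rel : List (List String)) (arr : PySem.Set (List String)) :
    checkGo index rel arr = true ↔
      ((rel.map (fun data => index.map (fun i => PySem.List.pyGetD data i ""))).Nodup ∧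
       ∀ r ∈ rel.map (fun data => index.map (fun i => PySem.List.pyGetD data i "")), r ∉ arr) := by
  induction rel generalizing arr with
  | nil => simp [checkGo]
  | cons data rest ih =>
    have hproj := proj_foldl_eq_map index data []
    simp only [checkGo, hproj, List.nil_append, List.map_cons, List.nodup_cons]
    by_cases h : (index.map (fun i => PySem.List.pyGetD data i "")) ∈ arr
    · rw [if_pos (by rw [PySem.Set.contains_iff]; exact h)]
      constructor
      · intro habs; cases habs
      · rintro ⟨_, hmem⟩
        exact absurd h (hmem _ (List.mem_cons_self))
    · rw [if_neg (by rw [PySem.Set.contains_iff]; exact h)]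
      rw [ih]
      simp only [PySem.Set.mem_add, List.mem_cons]
      constructor
      · rintro ⟨hnd, hmem⟩
        refine ⟨⟨fun hin => (hmem _ hin) (Or.inr rfl), hnd⟩, ?_⟩
        rintro r (rfl | hr)
        · exact h
        · exact fun ha => hmem r hr (Or.inl ha)
      · rintro ⟨⟨hni, hnd⟩, hmem⟩
        refine ⟨hnd, fun r hr hor => hor.elim (fun ha => hmem r (Or.inr hr) ha) (fun he => hni (he ▸ hr))⟩

-- B's recursive pairwise check is exactly Nodup
theorem distinctRows_iff_nodup (rows : List (List String)) :
    distinctRows rows = true ↔ rows.Nodup := by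
  induction rows with
  | nil => simp [distinctRows]
  | cons head rest ih =>
    simp only [distinctRows, Bool.and_eq_true, List.all_eq_true, bne_iff_ne, ih,
      List.nodup_cons]
    constructor
    · rintro ⟨hall, hnd⟩
      exact ⟨fun hin => hall _ hin rfl, hnd⟩
    · rintro ⟨hni, hnd⟩
      exact ⟨fun r hr he => hni (he ▸ hr), hnd⟩

-- ===== VERDICT (by name: the statement is the Claim_ definition above) =====
theorem check_spec : Claim_equal_check := by
  intro relation index _ _
  unfold Spec_check check check_alt
  rw [Bool.eq_iff_iff]
  rw [checkGo_iff, distinctRows_iff_nodup]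
  simp [PySem.Set.empty]
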